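-- pv_equiv track=rewrite | github.com/yyw794/badminton-score | 排阵/lineup_scheduler.py | generate_womens_doubles_matches
-- ===== SOURCE A (Python) =====
-- import itertools
-- from typing import List, Tuple, Dict, Optional
--
-- def generate_womens_doubles_matches(females: List[str]) -> List[Tuple[Tuple[str, str], Tuple[str, str]]]:
--     """Generate women's doubles matches."""
--     matches = []
--     if len(females) < 4:
--         return matches
--
--     for pair1 in itertools.combinations(females, 2):
--         remaining = [f for f in females if f not in pair1]
--         if len(remaining) < 2:
--             continue
--         for pair2 in itertools.combinations(remaining, 2):
--             match = (pair1, pair2)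
--             matches.append(match)
--     return matches
-- ===== SOURCE B (Python) =====
-- import itertools
-- from typing import List, Tuple
--
--
-- def generate_womens_doubles_matches(females: List[str]) -> List[Tuple[Tuple[str, str], Tuple[str, str]]]:
--     """Generate women's doubles matches."""
--     all_pairs = list(itertools.combinations(females, 2))
--     return [(p1, p2)
--             for p1 in all_pairs
--             for p2 in all_pairs
--             if p1[0] not in p2 and p1[1] not in p2]
-- ===== Notes on version B (the rewrite author's own statement) =====
-- stated objective: alternative
-- what changed: B builds the pair list once and double-loops over it with a value-disjointness test, instead of re-filtering the player list and recomputing combinations for every outer pair; the length<4 guard disappears because disjoint pairs need four positions.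
import Mathlib
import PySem

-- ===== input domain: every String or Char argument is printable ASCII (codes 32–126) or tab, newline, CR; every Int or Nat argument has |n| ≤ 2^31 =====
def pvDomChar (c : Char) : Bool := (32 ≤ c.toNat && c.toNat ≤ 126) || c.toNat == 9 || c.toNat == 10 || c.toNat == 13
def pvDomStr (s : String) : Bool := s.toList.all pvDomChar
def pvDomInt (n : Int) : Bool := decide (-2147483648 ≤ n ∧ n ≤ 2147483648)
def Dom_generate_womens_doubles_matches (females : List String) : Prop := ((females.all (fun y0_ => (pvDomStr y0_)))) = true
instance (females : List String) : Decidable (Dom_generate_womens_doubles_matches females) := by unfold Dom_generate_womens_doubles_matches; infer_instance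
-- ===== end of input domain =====

-- B builds the pair list once and filters it by value-disjointness, instead of re-filtering the
-- player list and recomputing combinations per outer pair (objective: alternative decomposition).

-- ===== PORT A =====
-- itertools.combinations(xs, 2), in Python's order
def pvPairs (xs : List String) : List (String × String) :=
  match xs with
  | [] => []
  | x :: rest => (rest.map (fun y => (x, y))) ++ pvPairs rest

-- the body of A's outer for-loop
def pvStepA (females : List String)
    (acc : List ((String × String) × (String × String))) (pair1 : String × String) :
    List ((String × String) × (String × String)) :=
  let remaining := females.filter (fun f => !(f == pair1.1) && !(f == pair1.2))
  if remaining.length < 2 then acc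
  else acc ++ (pvPairs remaining).map (fun pair2 => (pair1, pair2))

def generate_womens_doubles_matches (females : List String) :
    List ((String × String) × (String × String)) :=
  if females.length < 4 then []
  else (pvPairs females).foldl (pvStepA females) []

-- ===== PORT B =====
def generate_womens_doubles_matches_alt (females : List String) :
    List ((String × String) × (String × String)) :=
  let allPairs := pvPairs females
  allPairs.flatMap (fun p1 =>
    (allPairs.filter (fun p2 =>
        (!(p1.1 == p2.1) && !(p1.1 == p2.2)) && (!(p1.2 == p2.1) && !(p1.2 == p2.2)))).map
      (fun p2 => (p1, p2)))

-- ===== PRECONDITION & SPEC =====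
def Spec_generate_womens_doubles_matches (females : List String) (out : List ((String × String) × (String × String))) : Prop := out = generate_womens_doubles_matches_alt females
instance (females : List String) (out : List ((String × String) × (String × String))) : Decidable (Spec_generate_womens_doubles_matches females out) := by unfold Spec_generate_womens_doubles_matches; infer_instance

-- ===== CLAIM (what is proved, stated in full; the proofs are below) =====
def Claim_equal_generate_womens_doubles_matches : Prop := ∀ (females : List String), Dom_generate_womens_doubles_matches females → Spec_generate_womens_doubles_matches females (generate_womens_doubles_matches females)

-- ===== LEMMAS AND PROOFS =====

-- combinations of a short list are empty
theorem pvPairs_short (xs : List String) (h : xs.length < 2) : pvPairs xs = [] := by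
  match xs, h with
  | [], _ => rfl
  | [x], _ => rfl

-- combinations of a filtered list = filtered combinations
theorem pvPairs_filter (p : String → Bool) (xs : List String) :
    pvPairs (xs.filter p) = (pvPairs xs).filter (fun q => p q.1 && p q.2) := by
  induction xs with
  | nil => rfl
  | cons x rest ih =>
    by_cases hx : p x = true
    · simp [pvPairs, List.filter_cons, hx, ih, List.filter_map, Function.comp_def]
    · simp only [Bool.not_eq_true] at hx
      simp [pvPairs, List.filter_cons, hx, ih, List.filter_map, Function.comp_def]

-- A's fold, written as a flatMap
theorem foldlA_eq (females : List String) (l : List (String × String))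
    (init : List ((String × String) × (String × String))) :
    l.foldl (pvStepA females) init =
      init ++ l.flatMap (fun p1 =>
        (pvPairs (females.filter (fun f => !(f == p1.1) && !(f == p1.2)))).map
          (fun p2 => (p1, p2))) := by
  induction l generalizing init with
  | nil => simp
  | cons p1 rest ih =>
    simp only [List.foldl_cons, List.flatMap_cons, ih]
    by_cases h : (females.filter (fun f => !(f == p1.1) && !(f == p1.2))).length < 2
    · simp [pvStepA, h, pvPairs_short _ h]
    · simp [pvStepA, h, List.append_assoc]

theorem pvBeq_comm {α : Type} [BEq α] [LawfulBEq α] (a b : α) : (a == b) = (b == a) := by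
  by_cases h : a = b
  · subst h; rfl
  · rw [beq_eq_false_iff_ne.mpr h, beq_eq_false_iff_ne.mpr (Ne.symm h)]

theorem bool4 (a b c d : Bool) : ((!a && !c) && (!b && !d)) = ((!a && !b) && (!c && !d)) := by
  revert a b c d; decide

-- the per-pair contributions of A and B coincide
theorem contrib_eq (females : List String) (p1 : String × String) :
    (pvPairs (females.filter (fun f => !(f == p1.1) && !(f == p1.2)))).map
      (fun p2 => (p1, p2)) =
    ((pvPairs females).filter (fun p2 =>
        (!(p1.1 == p2.1) && !(p1.1 == p2.2)) && (!(p1.2 == p2.1) && !(p1.2 == p2.2)))).map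
      (fun p2 => (p1, p2)) := by
  rw [pvPairs_filter]
  congr 1
  apply List.filter_congr
  intro q _
  show ((!(q.1 == p1.1) && !(q.1 == p1.2)) && (!(q.2 == p1.1) && !(q.2 == p1.2))) =
       ((!(p1.1 == q.1) && !(p1.1 == q.2)) && (!(p1.2 == q.1) && !(p1.2 == q.2)))
  rw [pvBeq_comm q.1 p1.1, pvBeq_comm q.1 p1.2, pvBeq_comm q.2 p1.1, pvBeq_comm q.2 p1.2]
  exact bool4 (p1.1 == q.1) (p1.1 == q.2) (p1.2 == q.1) (p1.2 == q.2)

-- ===== VERDICT (by name: the statement is the Claim_ definition above) =====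
theorem generate_womens_doubles_matches_spec : Claim_equal_generate_womens_doubles_matches := by
  intro females _
  unfold Spec_generate_womens_doubles_matches
  by_cases h : females.length < 4
  · match females, h with
    | [], _ => rfl
    | [a], _ => rfl
    | [a, b], _ =>
      simp [generate_womens_doubles_matches, generate_womens_doubles_matches_alt, pvPairs]
    | [a, b, c], _ =>
      simp [generate_womens_doubles_matches, generate_womens_doubles_matches_alt, pvPairs]
  · simp only [generate_womens_doubles_matches, generate_womens_doubles_matches_alt]
    rw [if_neg h, foldlA_eq, List.nil_append]
    exact List.flatMap_congr (fun p1 _ => contrib_eq females p1)
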